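-- pv_equiv track=rewrite | github.com/Ashiq-am/Data-Structures-Algorithm | 1.Python Algorithms/11.Dynamic Programming/4.Intermediate Problems/108.Minimum insertions to sort an array/Minimum insertions to sort an array.py | minInsertionStepToSortArray
-- ===== SOURCE A (Python) =====
-- def minInsertionStepToSortArray(arr, N):
--
-- 	# lis[i] is going to store length
-- 	# of lis that ends with i.
-- 	lis = [0] * N
--
-- 	# Initialize lis values for all indexes
-- 	for i in range(N):
-- 		lis[i] = 1
--
-- 	# Compute optimized lis values in
-- 	# bottom up manner
-- 	for i in range(1, N):
-- 		for j in range(i):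
-- 			if (arr[i] >= arr[j] and
-- 				lis[i] < lis[j] + 1):
-- 				lis[i] = lis[j] + 1
--
-- 	# The overall LIS must end with of the array
-- 	# elements. Pick maximum of all lis values
-- 	max = 0
-- 	for i in range(N):
-- 		if (max < lis[i]):
-- 			max = lis[i]
--
-- 	# return size of array minus length
-- 	# of LIS as final result
-- 	return (N - max)
-- ===== SOURCE B (Python) =====
-- def minInsertionStepToSortArray(arr, N):
--     # Patience sorting: tails[k] = smallest possible last element of a
--     # non-decreasing subsequence of length k+1 among the first N elements.
--     tails = []
--     for i in range(N):
--         x = arr[i]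
--         lo, hi = 0, len(tails)
--         while lo < hi:
--             mid = (lo + hi) // 2
--             if tails[mid] <= x:
--                 lo = mid + 1
--             else:
--                 hi = mid
--         if lo == len(tails):
--             tails.append(x)
--         else:
--             tails[lo] = x
--     return N - len(tails)
-- ===== Notes on version B (the rewrite author's own statement) =====
-- stated objective: faster
-- what changed: Replaced the O(N^2) nested-loop LIS dynamic programming with patience sorting: a single pass keeping the minimal tail of each non-decreasing subsequence length, located by a hand-written binary search.
-- outside the precondition, e.g. on minInsertionStepToSortArray([], 1): A returns 0, B raises IndexError
import Mathlib
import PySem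

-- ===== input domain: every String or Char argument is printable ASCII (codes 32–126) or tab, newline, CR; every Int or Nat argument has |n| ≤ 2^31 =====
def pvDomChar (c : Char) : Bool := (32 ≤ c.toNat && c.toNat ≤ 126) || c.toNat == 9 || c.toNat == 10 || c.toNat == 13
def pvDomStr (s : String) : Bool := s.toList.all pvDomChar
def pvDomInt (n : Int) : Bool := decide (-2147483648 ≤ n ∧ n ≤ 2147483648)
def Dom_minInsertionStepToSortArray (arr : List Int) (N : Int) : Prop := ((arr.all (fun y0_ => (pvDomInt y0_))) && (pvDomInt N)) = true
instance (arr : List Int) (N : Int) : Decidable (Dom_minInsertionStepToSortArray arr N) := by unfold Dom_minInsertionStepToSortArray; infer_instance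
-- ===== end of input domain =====

-- B replaces A's O(N^2) nested-loop LIS DP by patience sorting (one pass, binary search
-- for the minimal tail of each subsequence length); objective: faster.

-- ===== PORT A =====
-- arr[i] / arr[j] are ported as pyGetD: Python raises IndexError exactly when some index
-- of range(N) is out of range of arr, i.e. when N > len(arr) — excluded by Pre_ below.
def minInsertionStepToSortArray (arr : List Int) (N : Int) : Int :=
  -- lis = [0] * N
  let lis0 : List Int := PySem.List.pyRepeat [0] N
  -- for i in range(N): lis[i] = 1
  let lis1 := (PySem.List.pyRange 0 N 1).foldl (fun l i => PySem.List.pySetD l i 1) lis0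
  -- for i in range(1, N): for j in range(i): if arr[i] >= arr[j] and lis[i] < lis[j] + 1: lis[i] = lis[j] + 1
  let lis2 := (PySem.List.pyRange 1 N 1).foldl (fun l i =>
      (PySem.List.pyRange 0 i 1).foldl (fun l j =>
        if PySem.List.pyGetD arr i 0 ≥ PySem.List.pyGetD arr j 0 ∧
           PySem.List.pyGetD l i 0 < PySem.List.pyGetD l j 0 + 1
        then PySem.List.pySetD l i (PySem.List.pyGetD l j 0 + 1) else l) l) lis1
  -- max = 0; for i in range(N): if max < lis[i]: max = lis[i]
  let mx := (PySem.List.pyRange 0 N 1).foldl (fun m i =>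
      if m < PySem.List.pyGetD lis2 i 0 then PySem.List.pyGetD lis2 i 0 else m) 0
  N - mx

-- ===== PORT B =====
-- the hand-written 'while lo < hi' binary search of Source B; lo, hi, mid are nonnegative
-- throughout in Python, so Nat arithmetic ((lo+hi)/2 = Python's (lo+hi)//2) is exact.
def pvBisect (tails : List Int) (x : Int) (lo hi : Nat) : Nat :=
  if lo < hi then
    if tails.getD ((lo + hi) / 2) 0 ≤ x then pvBisect tails x ((lo + hi) / 2 + 1) hi
    else pvBisect tails x lo ((lo + hi) / 2)
  else lo
termination_by hi - lo
decreasing_by all_goals omega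

-- body of Source B's 'for x in arr[:N]' loop
def pvStep (tails : List Int) (x : Int) : List Int :=
  let lo := pvBisect tails x 0 tails.length
  if lo = tails.length then tails ++ [x] else tails.set lo x

-- arr[i] is ported as pyGetD: Source B raises IndexError exactly when range(N) leaves arr's
-- index range, i.e. when 0 < N and N > len(arr) — excluded by Pre_ below.
def minInsertionStepToSortArray_alt (arr : List Int) (N : Int) : Int :=
  let tails := (PySem.List.pyRange 0 N 1).foldl
    (fun tails i => pvStep tails (PySem.List.pyGetD arr i 0)) []
  N - (tails.length : Int)

-- ===== PRECONDITION & SPEC =====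
-- Pre_ excludes the inputs with 0 < N and len(arr) < N: there Python A raises IndexError
-- (its inner loop reads arr[i] for some i ≥ len(arr)) except at the single corner
-- N = 1, arr = [], where A returns 0 only because its loops never read arr — B's loop
-- does read arr[0] and raises IndexError there, so that corner is excluded too.
def Pre_minInsertionStepToSortArray (arr : List Int) (N : Int) : Prop :=
  N ≤ (arr.length : Int) ∨ N ≤ 0
instance (arr : List Int) (N : Int) : Decidable (Pre_minInsertionStepToSortArray arr N) := by
  unfold Pre_minInsertionStepToSortArray; infer_instance

def pvWitness_minInsertionStepToSortArray : List Int × Int := ([3, 1, 2], 3)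

def Spec_minInsertionStepToSortArray (arr : List Int) (N : Int) (out : Int) : Prop := out = minInsertionStepToSortArray_alt arr N
instance (arr : List Int) (N : Int) (out : Int) : Decidable (Spec_minInsertionStepToSortArray arr N out) := by unfold Spec_minInsertionStepToSortArray; infer_instance

-- ===== CLAIM (what is proved, stated in full; the proofs are below) =====
def Claim_equal_minInsertionStepToSortArray : Prop := ∀ (arr : List Int) (N : Int), Dom_minInsertionStepToSortArray arr N → Pre_minInsertionStepToSortArray arr N → Spec_minInsertionStepToSortArray arr N (minInsertionStepToSortArray arr N)

-- ===== LEMMAS AND PROOFS =====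

-- ---- the common middle layer: the DP values A computes, as a functional fold ----

-- dp value of a new element x after the (value, dp) pairs `seen` (A's inner loop)
def pvDp (seen : List (Int × Int)) (x : Int) : Int :=
  seen.foldl (fun m p => if x ≥ p.1 ∧ m < p.2 + 1 then p.2 + 1 else m) 1

-- (value, dp) pairs of a prefix, left to right
def pvSeen (a : List Int) : List (Int × Int) :=
  a.foldl (fun s x => s ++ [(x, pvDp s x)]) []

def pvMax (ds : List Int) : Int := ds.foldl (fun m d => if m < d then d else m) 0

def pvTails (a : List Int) : List Int := a.foldl pvStep []

-- ---- basic facts about pvSeen ----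

theorem pvSeen_append (l : List Int) (x : Int) :
    pvSeen (l ++ [x]) = pvSeen l ++ [(x, pvDp (pvSeen l) x)] := by
  simp [pvSeen, List.foldl_append]

theorem pvSeen_map_fst (l : List Int) : (pvSeen l).map Prod.fst = l := by
  induction l using List.reverseRecOn with
  | nil => simp [pvSeen]
  | append_singleton l x ih => simp [pvSeen_append, ih]

theorem pvSeen_length (l : List Int) : (pvSeen l).length = l.length := by
  have := congrArg List.length (pvSeen_map_fst l); simpa using this

theorem pvTails_append (l : List Int) (x : Int) :
    pvTails (l ++ [x]) = pvStep (pvTails l) x := by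
  simp [pvTails, List.foldl_append]

-- ---- running-max characterisations of the two fold shapes ----

theorem pvDp_bounds (l : List (Int × Int)) (x : Int) :
    ∀ init : Int,
      init ≤ l.foldl (fun m p => if x ≥ p.1 ∧ m < p.2 + 1 then p.2 + 1 else m) init ∧
      (l.foldl (fun m p => if x ≥ p.1 ∧ m < p.2 + 1 then p.2 + 1 else m) init = init ∨
        ∃ p ∈ l, p.1 ≤ x ∧ l.foldl (fun m p => if x ≥ p.1 ∧ m < p.2 + 1 then p.2 + 1 else m) init = p.2 + 1) ∧
      ∀ p ∈ l, p.1 ≤ x → p.2 + 1 ≤ l.foldl (fun m p => if x ≥ p.1 ∧ m < p.2 + 1 then p.2 + 1 else m) init := by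
  induction l with
  | nil => simp
  | cons p l ih =>
    intro init
    simp only [List.foldl_cons]
    obtain ⟨ih1, ih2, ih3⟩ := ih (if x ≥ p.1 ∧ init < p.2 + 1 then p.2 + 1 else init)
    refine ⟨?_, ?_, ?_⟩
    · refine le_trans ?_ ih1; split_ifs <;> omega
    · rcases ih2 with h | ⟨q, hq, hqx, hqe⟩
      · rw [h]; split_ifs with hc
        · exact Or.inr ⟨p, List.mem_cons_self .., hc.1, rfl⟩
        · exact Or.inl rfl
      · exact Or.inr ⟨q, List.mem_cons_of_mem _ hq, hqx, hqe⟩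
    · intro q hq hqx
      rcases List.mem_cons.mp hq with rfl | hq
      · refine le_trans ?_ ih1; split_ifs <;> omega
      · exact ih3 q hq hqx

theorem pvMax_bounds (ds : List Int) :
    0 ≤ pvMax ds ∧ (pvMax ds = 0 ∨ pvMax ds ∈ ds) ∧ ∀ d ∈ ds, d ≤ pvMax ds := by
  have key : ∀ (l : List Int) (init : Int),
      init ≤ l.foldl (fun m d => if m < d then d else m) init ∧
      (l.foldl (fun m d => if m < d then d else m) init = init ∨
        l.foldl (fun m d => if m < d then d else m) init ∈ l) ∧
      ∀ d ∈ l, d ≤ l.foldl (fun m d => if m < d then d else m) init := by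
    intro l
    induction l with
    | nil => simp
    | cons d l ih =>
      intro init
      simp only [List.foldl_cons]
      obtain ⟨ih1, ih2, ih3⟩ := ih (if init < d then d else init)
      refine ⟨le_trans (by split_ifs <;> omega) ih1, ?_, ?_⟩
      · rcases ih2 with h | h
        · rw [h]; split_ifs with hc
          · exact Or.inr (List.mem_cons_self ..)
          · exact Or.inl rfl
        · exact Or.inr (List.mem_cons_of_mem _ h)
      · intro e he
        rcases List.mem_cons.mp he with rfl | he
        · exact le_trans (by split_ifs <;> omega) ih1
        · exact ih3 e he
  exact key ds 0

-- ---- the invariant tying A's dp pairs to B's tails ----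

def pvInv (seen : List (Int × Int)) (tails : List Int) : Prop :=
  (∀ p q : Nat, p ≤ q → q < tails.length → tails.getD p 0 ≤ tails.getD q 0) ∧
  (∀ k : Nat, k < tails.length →
      (tails.getD k 0, (k : Int) + 1) ∈ seen ∧
      ∀ p ∈ seen, p.2 = (k : Int) + 1 → tails.getD k 0 ≤ p.1) ∧
  (∀ p ∈ seen, 1 ≤ p.2 ∧ p.2 ≤ (tails.length : Int))

theorem pvBisect_split (tails : List Int) (x : Int)
    (hs : ∀ p q : Nat, p ≤ q → q < tails.length → tails.getD p 0 ≤ tails.getD q 0) :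
    ∀ lo hi : Nat, lo ≤ hi → hi ≤ tails.length →
      (∀ j, j < lo → tails.getD j 0 ≤ x) →
      (∀ j, hi ≤ j → j < tails.length → x < tails.getD j 0) →
      pvBisect tails x lo hi ≤ tails.length ∧
      (∀ j, j < pvBisect tails x lo hi → tails.getD j 0 ≤ x) ∧
      (∀ j, pvBisect tails x lo hi ≤ j → j < tails.length → x < tails.getD j 0) := by
  have H : ∀ fuel lo hi : Nat, hi - lo ≤ fuel → lo ≤ hi → hi ≤ tails.length →
      (∀ j, j < lo → tails.getD j 0 ≤ x) →
      (∀ j, hi ≤ j → j < tails.length → x < tails.getD j 0) →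
      pvBisect tails x lo hi ≤ tails.length ∧
      (∀ j, j < pvBisect tails x lo hi → tails.getD j 0 ≤ x) ∧
      (∀ j, pvBisect tails x lo hi ≤ j → j < tails.length → x < tails.getD j 0) := by
    intro fuel
    induction fuel with
    | zero =>
      intro lo hi hf hlh hhl hbelow habove
      have heq : ¬ lo < hi := by omega
      rw [pvBisect, if_neg heq]
      exact ⟨by omega, hbelow, fun j hj hjl => habove j (by omega) hjl⟩
    | succ fuel ih =>
      intro lo hi hf hlh hhl hbelow habove
      by_cases hlt : lo < hi
      · rw [pvBisect, if_pos hlt]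
        have hmid : lo ≤ (lo + hi) / 2 ∧ (lo + hi) / 2 < hi := by omega
        by_cases hc : tails.getD ((lo + hi) / 2) 0 ≤ x
        · rw [if_pos hc]
          refine ih ((lo + hi) / 2 + 1) hi (by omega) (by omega) hhl ?_ habove
          intro j hj
          exact le_trans (hs j ((lo + hi) / 2) (by omega) (by omega)) hc
        · rw [if_neg hc]
          refine ih lo ((lo + hi) / 2) (by omega) (by omega) (by omega) hbelow ?_
          intro j hj hjl
          exact lt_of_lt_of_le (by omega) (hs ((lo + hi) / 2) j hj hjl)
      · rw [pvBisect, if_neg hlt]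
        exact ⟨by omega, hbelow, fun j hj hjl => habove j (by omega) hjl⟩
  intro lo hi h1 h2 h3 h4
  exact H (hi - lo) lo hi le_rfl h1 h2 h3 h4

theorem pvDp_eq_bisect (seen : List (Int × Int)) (tails : List Int) (x : Int)
    (h : pvInv seen tails) :
    pvDp seen x = (pvBisect tails x 0 tails.length : Int) + 1 := by
  obtain ⟨hs, hb, hc⟩ := h
  obtain ⟨hr1, hr2, hr3⟩ := pvBisect_split tails x hs 0 tails.length (Nat.zero_le _) le_rfl
    (fun j hj => absurd hj (Nat.not_lt_zero j))
    (fun j hj hjl => absurd (lt_of_le_of_lt hj hjl) (lt_irrefl _))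
  obtain ⟨h1, h2, h3⟩ := pvDp_bounds seen x 1
  set r := pvBisect tails x 0 tails.length with hrdef
  have hub : pvDp seen x ≤ (r : Int) + 1 := by
    unfold pvDp
    rcases h2 with he | ⟨p, hp, hpx, he⟩
    · rw [he]; omega
    · rw [he]
      obtain ⟨hp1, hp2⟩ := hc p hp
      set k : Nat := (p.2 - 1).toNat with hkdef
      have hk : (k : Int) = p.2 - 1 := Int.toNat_of_nonneg (by omega)
      have hklen : k < tails.length := by omega
      have hmin : tails.getD k 0 ≤ p.1 := (hb k hklen).2 p hp (by omega)
      have : ¬ r ≤ k := fun hle => absurd (le_trans hmin hpx) (not_le.mpr (hr3 k hle hklen))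
      omega
  have hlb : (r : Int) + 1 ≤ pvDp seen x := by
    unfold pvDp
    rcases Nat.eq_zero_or_pos r with hr0 | hrpos
    · rw [hr0]; push_cast; omega
    · have hklen : r - 1 < tails.length := by omega
      have hmem := (hb (r - 1) hklen).1
      have hfst : tails.getD (r - 1) 0 ≤ x := hr2 (r - 1) (by omega)
      have := h3 _ hmem hfst
      have hcast : ((r - 1 : Nat) : Int) = (r : Int) - 1 := by push_cast [Nat.cast_sub hrpos]; ring
      simp only [hcast] at this
      omega
  omega

theorem pvInv_step (seen : List (Int × Int)) (tails : List Int) (x : Int)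
    (h : pvInv seen tails) :
    pvInv (seen ++ [(x, pvDp seen x)]) (pvStep tails x) := by
  obtain ⟨hs, hb, hc⟩ := h
  obtain ⟨hr1, hr2, hr3⟩ := pvBisect_split tails x hs 0 tails.length (Nat.zero_le _) le_rfl
    (fun j hj => absurd hj (Nat.not_lt_zero j))
    (fun j hj hjl => absurd (lt_of_le_of_lt hj hjl) (lt_irrefl _))
  have hdp : pvDp seen x = (pvBisect tails x 0 tails.length : Int) + 1 :=
    pvDp_eq_bisect seen tails x ⟨hs, hb, hc⟩
  set r := pvBisect tails x 0 tails.length with hrdef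
  simp only [pvStep, ← hrdef]
  by_cases hre : r = tails.length
  · rw [if_pos hre]
    have hget_old : ∀ j : Nat, j < tails.length → (tails ++ [x]).getD j 0 = tails.getD j 0 :=
      fun j hj => List.getD_append _ _ _ _ hj
    have hget_new : (tails ++ [x]).getD tails.length 0 = x := by
      simp [List.getD_eq_getElem?_getD]
    have hlen : (tails ++ [x]).length = tails.length + 1 := by simp
    refine ⟨?_, ?_, ?_⟩
    · intro p q hpq hq
      rw [hlen] at hq
      rcases Nat.lt_or_ge q tails.length with hqlt | hqe
      · rw [hget_old p (by omega), hget_old q hqlt]; exact hs p q hpq hqlt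
      · have hq' : q = tails.length := by omega
        subst hq'
        rw [hget_new]
        rcases Nat.lt_or_ge p tails.length with hplt | hpe
        · rw [hget_old p hplt]; exact hr2 p (by omega)
        · have hp' : p = tails.length := by omega
          subst hp'; rw [hget_new]
    · intro k hk
      rw [hlen] at hk
      rcases Nat.lt_or_ge k tails.length with hklt | hke
      · rw [hget_old k hklt]
        refine ⟨List.mem_append_left _ (hb k hklt).1, ?_⟩
        intro p hp hp2
        rcases List.mem_append.mp hp with hp | hp
        · exact (hb k hklt).2 p hp hp2
        · simp only [List.mem_singleton] at hp
          subst hp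
          simp only at hp2
          rw [hdp] at hp2
          exfalso; omega
      · have hk' : k = tails.length := by omega
        subst hk'
        rw [hget_new]
        refine ⟨?_, ?_⟩
        · refine List.mem_append_right _ ?_
          have : pvDp seen x = (tails.length : Int) + 1 := by rw [hdp, hre]
          rw [← this]; exact List.mem_singleton_self _
        · intro p hp hp2
          rcases List.mem_append.mp hp with hp | hp
          · exfalso; have := (hc p hp).2; omega
          · simp only [List.mem_singleton] at hp; subst hp; exact le_refl x
    · intro p hp
      rw [hlen]
      rcases List.mem_append.mp hp with hp | hp
      · have := hc p hp; push_cast; omega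
      · simp only [List.mem_singleton] at hp; subst hp
        simp only; rw [hdp]; push_cast; omega
  · rw [if_neg hre]
    have hrlt : r < tails.length := lt_of_le_of_ne hr1 hre
    have hlen : (tails.set r x).length = tails.length := List.length_set ..
    have hget : ∀ j : Nat, j < tails.length →
        (tails.set r x).getD j 0 = if j = r then x else tails.getD j 0 := by
      intro j hj
      rcases eq_or_ne j r with rfl | hne
      · simp [List.getD_eq_getElem?_getD, hj]
      · simp [List.getD_eq_getElem?_getD, List.getElem?_set_ne (Ne.symm hne), hne]
    refine ⟨?_, ?_, ?_⟩
    · intro p q hpq hq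
      rw [hlen] at hq
      rw [hget p (by omega), hget q hq]
      split_ifs with hp1 hq1 hq1
      · exact le_refl x
      · subst hp1
        exact le_of_lt (hr3 q (by omega) hq)
      · subst hq1
        exact hr2 p (by omega)
      · exact hs p q hpq hq
    · intro k hk
      rw [hlen] at hk
      rw [hget k hk]
      rcases eq_or_ne k r with rfl | hne
      · rw [if_pos rfl]
        refine ⟨?_, ?_⟩
        · refine List.mem_append_right _ ?_
          have : pvDp seen x = (r : Int) + 1 := hdp
          rw [← this]; exact List.mem_singleton_self _
        · intro p hp hp2
          rcases List.mem_append.mp hp with hp | hp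
          · have hmin := (hb r hk).2 p hp hp2
            have hx : x < tails.getD r 0 := hr3 r le_rfl hk
            omega
          · simp only [List.mem_singleton] at hp; subst hp; exact le_refl x
      · rw [if_neg hne]
        refine ⟨List.mem_append_left _ (hb k hk).1, ?_⟩
        intro p hp hp2
        rcases List.mem_append.mp hp with hp | hp
        · exact (hb k hk).2 p hp hp2
        · simp only [List.mem_singleton] at hp; subst hp
          simp only at hp2
          rw [hdp] at hp2
          exfalso; omega
    · intro p hp
      rw [hlen]
      rcases List.mem_append.mp hp with hp | hp
      · exact hc p hp
      · simp only [List.mem_singleton] at hp; subst hp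
        simp only; rw [hdp]; omega

theorem pvInv_holds (a : List Int) : pvInv (pvSeen a) (pvTails a) := by
  induction a using List.reverseRecOn with
  | nil =>
    refine ⟨?_, ?_, ?_⟩ <;> simp [pvSeen, pvTails]
  | append_singleton l x ih =>
    rw [pvSeen_append, pvTails_append]
    exact pvInv_step _ _ _ ih

theorem pvMax_eq_length (seen : List (Int × Int)) (tails : List Int) (h : pvInv seen tails) :
    pvMax (seen.map Prod.snd) = (tails.length : Int) := by
  obtain ⟨hs, hb, hc⟩ := h
  obtain ⟨h0, h1, h2⟩ := pvMax_bounds (seen.map Prod.snd)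
  have hub : pvMax (seen.map Prod.snd) ≤ (tails.length : Int) := by
    rcases h1 with he | hm
    · rw [he]; positivity
    · obtain ⟨p, hp, he⟩ := List.mem_map.mp hm
      rw [← he]; exact (hc p hp).2
  have hlb : (tails.length : Int) ≤ pvMax (seen.map Prod.snd) := by
    rcases Nat.eq_zero_or_pos tails.length with hl0 | hlpos
    · rw [hl0]; exact_mod_cast h0
    · have hklen : tails.length - 1 < tails.length := by omega
      have hmem := (hb (tails.length - 1) hklen).1
      have := h2 _ (List.mem_map.mpr ⟨_, hmem, rfl⟩)
      simp only at this
      have hcast : ((tails.length - 1 : Nat) : Int) = (tails.length : Int) - 1 := by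
        push_cast [Nat.cast_sub hlpos]; ring
      omega
  omega

theorem pv_core (a : List Int) : pvMax ((pvSeen a).map Prod.snd) = ((pvTails a).length : Int) :=
  pvMax_eq_length _ _ (pvInv_holds a)

-- ---- reduction of port A to the middle layer ----

theorem pv_set_range (v : Int) : ∀ (m : Nat) (l : List Int), m ≤ l.length →
    (List.range m).foldl (fun l k => l.set k v) l = List.replicate m v ++ l.drop m := by
  intro m
  induction m with
  | zero => intro l h; simp
  | succ m ih =>
    intro l h
    rw [List.range_succ, List.foldl_append, ih l (by omega)]
    simp only [List.foldl_cons, List.foldl_nil]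
    rw [List.set_append]
    simp only [List.length_replicate, lt_irrefl, Nat.sub_self]
    have hm : m < l.length := by omega
    rw [List.drop_eq_getElem_cons hm, List.set_cons_zero, List.replicate_succ',
      List.append_assoc]
    simp

theorem pv_init (n : Nat) :
    (PySem.List.pyRange 0 (n : Int) 1).foldl (fun l i => PySem.List.pySetD l i 1)
      (PySem.List.pyRepeat [0] (n : Int)) = List.replicate n (1 : Int) := by
  rw [PySem.List.pyRepeat_singleton, PySem.List.pyRange_zero_nat, List.foldl_map]
  simp only [PySem.List.pySetD_natCast, Int.toNat_natCast]
  rw [pv_set_range 1 n (List.replicate n (0:Int)) (by simp)]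
  simp

theorem pv_inner_shift (arr : List Int) (ds tail : List Int) :
    ∀ (js : List Int), (∀ j ∈ js, 0 ≤ j ∧ j < (ds.length : Int)) → ∀ (cur : Int),
    js.foldl (fun l j =>
        if PySem.List.pyGetD arr (ds.length : Int) 0 ≥ PySem.List.pyGetD arr j 0 ∧
           PySem.List.pyGetD l (ds.length : Int) 0 < PySem.List.pyGetD l j 0 + 1
        then PySem.List.pySetD l (ds.length : Int) (PySem.List.pyGetD l j 0 + 1) else l)
      (ds ++ cur :: tail)
    = ds ++ (js.foldl (fun c j =>
        if PySem.List.pyGetD arr (ds.length : Int) 0 ≥ PySem.List.pyGetD arr j 0 ∧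
           c < PySem.List.pyGetD ds j 0 + 1
        then PySem.List.pyGetD ds j 0 + 1 else c) cur) :: tail := by
  intro js
  induction js with
  | nil => intro _ cur; simp
  | cons j js ih =>
    intro hjs cur
    obtain ⟨hj0, hjm⟩ := hjs j (List.mem_cons_self ..)
    have hmem := fun j hj => hjs j (List.mem_cons_of_mem _ hj)
    simp only [List.foldl_cons]
    have hjt : (j.toNat : Int) = j := Int.toNat_of_nonneg hj0
    have hgm : PySem.List.pyGetD (ds ++ cur :: tail) (ds.length : Int) 0 = cur := by
      rw [PySem.List.pyGetD_eq_getElem _ _ (Int.natCast_nonneg _) (by simp)]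
      simp [List.getElem_append_right]
    have hgj : PySem.List.pyGetD (ds ++ cur :: tail) j 0 = PySem.List.pyGetD ds j 0 := by
      rw [PySem.List.pyGetD_eq_getElem _ _ hj0 (by simp; omega),
          PySem.List.pyGetD_eq_getElem _ _ hj0 (by omega)]
      exact List.getElem_append_left (by omega)
    have hset : ∀ v, PySem.List.pySetD (ds ++ cur :: tail) (ds.length : Int) v
        = ds ++ v :: tail := by
      intro v
      rw [PySem.List.pySetD_natCast, List.set_append]
      simp
    rw [hgm, hgj]
    by_cases hcond : PySem.List.pyGetD arr (ds.length : Int) 0 ≥ PySem.List.pyGetD arr j 0 ∧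
        cur < PySem.List.pyGetD ds j 0 + 1
    · rw [if_pos hcond, if_pos hcond, hset]
      exact ih hmem _
    · rw [if_neg hcond, if_neg hcond]
      exact ih hmem _

theorem pv_dpfold (arr : List Int) (m : Nat) (hm : m < arr.length) :
    (PySem.List.pyRange 0 (m : Int) 1).foldl (fun c j =>
        if PySem.List.pyGetD arr (m : Int) 0 ≥ PySem.List.pyGetD arr j 0 ∧
           c < PySem.List.pyGetD ((pvSeen (arr.take m)).map Prod.snd) j 0 + 1
        then PySem.List.pyGetD ((pvSeen (arr.take m)).map Prod.snd) j 0 + 1 else c) 1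
    = pvDp (pvSeen (arr.take m)) arr[m] := by
  set seen := pvSeen (arr.take m) with hseen
  have hlen : seen.length = m := by
    rw [hseen, pvSeen_length, List.length_take]; omega
  have hx : PySem.List.pyGetD arr (m : Int) 0 = arr[m] := by
    rw [PySem.List.pyGetD_eq_getElem _ _ (Int.natCast_nonneg _) (by exact_mod_cast hm)]
    simp
  have hcg : ∀ (c : Int), ∀ j ∈ PySem.List.pyRange 0 (m : Int) 1,
      (if PySem.List.pyGetD arr (m : Int) 0 ≥ PySem.List.pyGetD arr j 0 ∧
           c < PySem.List.pyGetD (seen.map Prod.snd) j 0 + 1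
        then PySem.List.pyGetD (seen.map Prod.snd) j 0 + 1 else c)
      = (fun (c : Int) (p : Int × Int) => if arr[m] ≥ p.1 ∧ c < p.2 + 1 then p.2 + 1 else c) c
          (PySem.List.pyGetD seen j (0, 0)) := by
    intro c j hj
    obtain ⟨hj0, hjm⟩ := (PySem.List.mem_pyRange_one).mp hj
    have hjt : j.toNat < m := by omega
    have hjta : j.toNat < arr.length := by omega
    have hget : PySem.List.pyGetD seen j (0, 0) = seen[j.toNat]'(by omega) :=
      PySem.List.pyGetD_eq_getElem _ _ hj0 (by omega)
    have hmap : seen.map Prod.fst = arr.take m := by rw [hseen]; exact pvSeen_map_fst _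
    have hfst : (seen[j.toNat]'(by omega)).1 = arr[j.toNat]'(by omega) := by
      have h1 : (seen.map Prod.fst)[j.toNat]'(by simp; omega) = (seen[j.toNat]'(by omega)).1 :=
        List.getElem_map ..
      rw [← h1]
      have h3 : ∀ (hlt : j.toNat < (seen.map Prod.fst).length),
          (seen.map Prod.fst)[j.toNat]'hlt = arr[j.toNat]'(by omega) := by
        rw [hmap]
        intro hlt
        exact List.getElem_take ..
      exact h3 _
    have hsnd : PySem.List.pyGetD (seen.map Prod.snd) j 0 = (seen[j.toNat]'(by omega)).2 := by
      rw [PySem.List.pyGetD_eq_getElem _ _ hj0 (by simp; omega)]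
      exact List.getElem_map ..
    have harj : PySem.List.pyGetD arr j 0 = arr[j.toNat]'(by omega) :=
      PySem.List.pyGetD_eq_getElem _ _ hj0 (by omega)
    rw [hx, hsnd, harj, hget]
    simp only [hfst]
  rw [PySem.List.foldl_congr_mem _ _ _ _ hcg]
  rw [show ((m : Int)) = ((seen.length : Int)) by rw [hlen]]
  rw [PySem.List.foldl_pyRange_zero_pyGetD' seen (0, 0)
    (fun (c : Int) (p : Int × Int) => if arr[m] ≥ p.1 ∧ c < p.2 + 1 then p.2 + 1 else c) 1]
  rfl

theorem pv_outer (arr : List Int) (n : Nat) (hn : n ≤ arr.length) :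
    ∀ m : Nat, m ≤ n →
    (PySem.List.pyRange 1 (m : Int) 1).foldl (fun l i =>
        (PySem.List.pyRange 0 i 1).foldl (fun l j =>
          if PySem.List.pyGetD arr i 0 ≥ PySem.List.pyGetD arr j 0 ∧
             PySem.List.pyGetD l i 0 < PySem.List.pyGetD l j 0 + 1
          then PySem.List.pySetD l i (PySem.List.pyGetD l j 0 + 1) else l) l)
      (List.replicate n (1 : Int))
    = (pvSeen (arr.take m)).map Prod.snd ++ List.replicate (n - m) 1 := by
  intro m
  induction m with
  | zero =>
    intro _
    rw [show ((0 : Nat) : Int) = 0 by simp, PySem.List.pyRange_one_eq_nil (by norm_num)]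
    simp [pvSeen]
  | succ m ih =>
    intro hm1
    rcases Nat.eq_zero_or_pos m with rfl | hmpos
    · -- m+1 = 1 : the fold over pyRange 1 1 is empty
      rw [show ((1 : Nat) : Int) = 1 by simp, PySem.List.pyRange_one_eq_nil le_rfl]
      simp only [List.foldl_nil]
      have harr : arr.take 1 = [arr[0]'(by omega)] := by
        rcases arr with _ | ⟨a, t⟩
        · simp at hn; omega
        · simp
      rw [harr]
      have hseen1 : pvSeen [arr[0]'(by omega)] = [(arr[0]'(by omega), 1)] := rfl
      rw [hseen1]
      simp only [List.map_cons, List.map_nil, List.singleton_append]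
      rw [← List.replicate_succ]
      congr 1
      omega
    · have hcast : ((m + 1 : Nat) : Int) = (m : Int) + 1 := by push_cast; ring
      rw [hcast, PySem.List.pyRange_one_succ_right (by exact_mod_cast hmpos), List.foldl_append,
        ih (by omega)]
      simp only [List.foldl_cons, List.foldl_nil]
      set ds := (pvSeen (arr.take m)).map Prod.snd with hds
      have hdslen : ds.length = m := by
        rw [hds, List.length_map, pvSeen_length, List.length_take]; omega
      have hrep : List.replicate (n - m) (1 : Int) = 1 :: List.replicate (n - m - 1) 1 := by
        rw [← List.replicate_succ]; congr 1; omega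
      rw [hrep]
      rw [show ((m : Int)) = ((ds.length : Int)) by rw [hdslen]]
      rw [pv_inner_shift arr ds (List.replicate (n - m - 1) 1)
        (PySem.List.pyRange 0 (ds.length : Int) 1)
        (fun j hj => (PySem.List.mem_pyRange_one).mp hj) 1]
      rw [show ((ds.length : Int)) = ((m : Int)) by rw [hdslen]]
      rw [hds, pv_dpfold arr m (by omega)]
      have htake : arr.take (m + 1) = arr.take m ++ [arr[m]'(by omega)] := by
        rw [List.take_add_one]
        simp [List.getElem?_eq_getElem (show m < arr.length by omega)]
      rw [htake, pvSeen_append]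
      simp [List.append_assoc]
      omega


theorem portA_char (arr : List Int) (N : Int) (h0 : 0 ≤ N) (hN : N ≤ (arr.length : Int)) :
    minInsertionStepToSortArray arr N = N - pvMax ((pvSeen (arr.take N.toNat)).map Prod.snd) := by
  obtain ⟨n, rfl⟩ : ∃ n : Nat, N = (n : Int) := ⟨N.toNat, (Int.toNat_of_nonneg h0).symm⟩
  have hn : n ≤ arr.length := by exact_mod_cast hN
  simp only [Int.toNat_natCast, minInsertionStepToSortArray]
  rw [pv_init n, pv_outer arr n hn n le_rfl]
  simp only [Nat.sub_self, List.replicate_zero, List.append_nil]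
  set ds := (pvSeen (arr.take n)).map Prod.snd with hds
  have hdslen : ds.length = n := by
    rw [hds, List.length_map, pvSeen_length, List.length_take]; omega
  rw [show ((n : Int)) = ((ds.length : Int)) by rw [hdslen]]
  rw [PySem.List.foldl_pyRange_zero_pyGetD' ds 0
    (fun (m : Int) (d : Int) => if m < d then d else m) 0]
  rw [hdslen]
  rfl

-- ---- reduction of port B to the middle layer ----

theorem portB_char (arr : List Int) (N : Int) (h0 : 0 ≤ N) (hN : N ≤ (arr.length : Int)) :
    minInsertionStepToSortArray_alt arr N = N - ((pvTails (arr.take N.toNat)).length : Int) := by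
  obtain ⟨n, rfl⟩ : ∃ n : Nat, N = (n : Int) := ⟨N.toNat, (Int.toNat_of_nonneg h0).symm⟩
  have hn : n ≤ arr.length := by exact_mod_cast hN
  simp only [minInsertionStepToSortArray_alt, Int.toNat_natCast]
  have hcg : ∀ (t : List Int), ∀ j ∈ PySem.List.pyRange 0 (n : Int) 1,
      pvStep t (PySem.List.pyGetD arr j 0) = pvStep t (PySem.List.pyGetD (arr.take n) j 0) := by
    intro t j hj
    obtain ⟨hj0, hjn⟩ := (PySem.List.mem_pyRange_one).mp hj
    congr 1
    rw [PySem.List.pyGetD_eq_getElem _ _ hj0 (by omega),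
        PySem.List.pyGetD_eq_getElem _ _ hj0 (by simp; omega)]
    exact (List.getElem_take ..).symm
  rw [PySem.List.foldl_congr_mem _ _ _ [] hcg]
  have hfold : (PySem.List.pyRange 0 (n : Int) 1).foldl
      (fun t j => pvStep t (PySem.List.pyGetD (arr.take n) j 0)) []
      = (arr.take n).foldl pvStep [] := by
    rw [show ((n : Int)) = (((arr.take n).length : Int)) by simp; omega]
    exact PySem.List.foldl_pyRange_zero_pyGetD' (arr.take n) 0 pvStep []
  rw [hfold]
  rfl

-- ===== VERDICT (by name: the statement is the Claim_ definition above) =====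
theorem minInsertionStepToSortArray_spec : Claim_equal_minInsertionStepToSortArray := by
  intro arr N _ hpre
  unfold Spec_minInsertionStepToSortArray
  rcases lt_or_ge N 0 with hneg | h0
  · -- N < 0: every loop of both programs is empty; both return N - 0
    have hA : minInsertionStepToSortArray arr N = N := by
      simp only [minInsertionStepToSortArray]
      rw [PySem.List.pyRange_one_eq_nil (le_of_lt hneg),
          PySem.List.pyRange_one_eq_nil (by omega)]
      simp
    have hB : minInsertionStepToSortArray_alt arr N = N := by
      simp only [minInsertionStepToSortArray_alt]
      rw [PySem.List.pyRange_one_eq_nil (le_of_lt hneg)]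
      simp
    rw [hA, hB]
  · have hN : N ≤ (arr.length : Int) := by
      rcases hpre with h | h
      · exact h
      · omega
    rw [portA_char arr N h0 hN, portB_char arr N h0 hN, pv_core]
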